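-- pv_equiv track=rewrite | github.com/AidanS39/music-nlp | src/music.py | get_naive_elements
-- ===== SOURCE A (Python) =====
-- def get_naive_elements(documents: list()):
--
--     # list of classifiers
--     classifiers = list()
--
--     # dictionary of the number of documents for each classifier
--     num_docs = dict()
--
--     # dictionary of the total number of words of every document for each classifier
--     num_words = dict()
--
--     # dictionary of bag of words for each classifier
--     bows = dict()
--
--     # set of all words in data
--     vocab = set()
--
--     # iterate through every document
--     for doc in documents:
--         classifier = doc[0]
--         content = doc[1]
--         if classifier not in classifiers:
--             classifiers.append(classifier)
--             num_docs[classifier] = 1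
--             num_words[classifier] = 0
--             bows[classifier] = dict()
--         else:
--             num_docs[classifier] += 1
--
--         # iterate through every word in current document
--         for word in content.split():
--             num_words[classifier] += 1
--             vocab.add(word)
--             if word not in bows[classifier].keys():
--                 bows[classifier][word] = 1
--             else:
--                 bows[classifier][word] += 1
--
--     return classifiers, num_docs, num_words, bows, vocab
-- ===== SOURCE B (Python) =====
-- def get_naive_elements(documents: list()):
--     # Phase 1: one pass to collect classifiers in first-appearance order,
--     # group document contents per classifier, and count documents.
--     classifiers = list()
--     groups = dict()
--     num_docs = dict()
--     for classifier, content in documents: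
--         if classifier not in groups:
--             classifiers.append(classifier)
--             groups[classifier] = list()
--             num_docs[classifier] = 0
--         groups[classifier].append(content)
--         num_docs[classifier] += 1
--
--     # Phase 2: per classifier, tokenize its grouped contents once.
--     num_words = dict()
--     bows = dict()
--     for classifier in classifiers:
--         words = [word for content in groups[classifier] for word in content.split()]
--         num_words[classifier] = len(words)
--         bow = dict()
--         for word in words:
--             bow[word] = bow.get(word, 0) + 1
--         bows[classifier] = bow
--
--     # Global vocabulary in one comprehension over all documents.
--     vocab = {word for _, content in documents for word in content.split()}
--
--     return classifiers, num_docs, num_words, bows, vocab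
-- ===== Notes on version B (the rewrite author's own statement) =====
-- stated objective: alternative
-- what changed: A builds all five structures in one interleaved pass with a per-word update of shared dicts; B first groups document contents per classifier in one pass, then computes word counts and bags of words per classifier from the grouped contents in a second phase, and builds the vocabulary by a single comprehension over all documents.
import Mathlib
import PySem

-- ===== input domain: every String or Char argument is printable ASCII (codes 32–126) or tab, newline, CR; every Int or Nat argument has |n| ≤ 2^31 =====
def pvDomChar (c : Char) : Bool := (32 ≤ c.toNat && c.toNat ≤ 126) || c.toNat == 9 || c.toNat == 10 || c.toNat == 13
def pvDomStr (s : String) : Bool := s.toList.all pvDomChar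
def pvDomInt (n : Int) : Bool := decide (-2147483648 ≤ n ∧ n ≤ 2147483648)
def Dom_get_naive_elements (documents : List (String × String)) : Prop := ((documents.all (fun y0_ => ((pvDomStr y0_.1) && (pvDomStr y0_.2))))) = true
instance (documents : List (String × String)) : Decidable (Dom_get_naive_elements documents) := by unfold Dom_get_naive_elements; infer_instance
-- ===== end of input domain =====

-- B replaces A's single interleaved pass by a group-then-count decomposition (same cost); equivalence of the return values is proved.

-- ===== PORT A =====
-- inner loop of A: 'for word in content.split(): …' — updates num_words, bows, vocab
def gneInner (classifier : String)
    (st : PySem.Dict String Int × PySem.Dict String (PySem.Dict String Int) × PySem.Set String)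
    (word : String) :
    PySem.Dict String Int × PySem.Dict String (PySem.Dict String Int) × PySem.Set String :=
  let (num_words, bows, vocab) := st
  let num_words := num_words.modify classifier 0 (· + 1)
  let vocab := vocab.add word
  let bow := bows.getD classifier PySem.Dict.empty
  let bows := if bow.contains word = false
              then bows.insert classifier (bow.insert word 1)
              else bows.insert classifier (bow.modify word 0 (· + 1))
  (num_words, bows, vocab)

-- body of A's 'for doc in documents:' loop
def gneStep
    (st : List String × PySem.Dict String Int × PySem.Dict String Int ×
          PySem.Dict String (PySem.Dict String Int) × PySem.Set String)
    (doc : String × String) :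
    List String × PySem.Dict String Int × PySem.Dict String Int ×
    PySem.Dict String (PySem.Dict String Int) × PySem.Set String :=
  let (classifiers, num_docs, num_words, bows, vocab) := st
  let classifier := doc.1
  let content := doc.2
  let (classifiers, num_docs, num_words, bows) :=
    if classifiers.contains classifier = false then
      (classifiers ++ [classifier], num_docs.insert classifier 1,
       num_words.insert classifier 0, bows.insert classifier PySem.Dict.empty)
    else
      (classifiers, num_docs.modify classifier 0 (· + 1), num_words, bows)
  let (num_words, bows, vocab) := (PySem.Str.split₀ content).foldl (gneInner classifier) (num_words, bows, vocab)
  (classifiers, num_docs, num_words, bows, vocab)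

def get_naive_elements (documents : List (String × String)) :
    List String × (List (String × Int)) × (List (String × Int)) ×
    (List (String × List (String × Int))) × List String :=
  let (classifiers, num_docs, num_words, bows, vocab) :=
    documents.foldl gneStep ([], PySem.Dict.empty, PySem.Dict.empty, PySem.Dict.empty, PySem.Set.empty)
  (classifiers, num_docs.items, num_words.items,
   bows.items.map (fun p => (p.1, p.2.items)), vocab)

-- ===== PORT B =====
-- phase 1 of B: collect classifiers, group contents, count documents
def gneAltGroup
    (st : List String × PySem.Dict String (List String) × PySem.Dict String Int)
    (doc : String × String) :
    List String × PySem.Dict String (List String) × PySem.Dict String Int :=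
  let (classifiers, groups, num_docs) := st
  let (classifiers, groups, num_docs) :=
    if groups.contains doc.1 = false then
      (classifiers ++ [doc.1], groups.insert doc.1 [], num_docs.insert doc.1 0)
    else
      (classifiers, groups, num_docs)
  (classifiers, groups.modify doc.1 [] (· ++ [doc.2]), num_docs.modify doc.1 0 (· + 1))

-- 'bow = {}; for word in words: bow[word] = bow.get(word, 0) + 1'
def gneAltBow (words : List String) : PySem.Dict String Int :=
  words.foldl (fun b w => b.insert w (b.getD w 0 + 1)) PySem.Dict.empty

def get_naive_elements_alt (documents : List (String × String)) :
    List String × (List (String × Int)) × (List (String × Int)) ×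
    (List (String × List (String × Int))) × List String :=
  let (classifiers, groups, num_docs) :=
    documents.foldl gneAltGroup ([], PySem.Dict.empty, PySem.Dict.empty)
  -- phase 2: per classifier, tokenize its grouped contents once
  let (num_words, bows) :=
    classifiers.foldl
      (fun (st : PySem.Dict String Int × PySem.Dict String (PySem.Dict String Int)) c =>
        let words := (groups.getD c []).flatMap (fun content => PySem.Str.split₀ content)
        (st.1.insert c (words.length : Int), st.2.insert c (gneAltBow words)))
      (PySem.Dict.empty, PySem.Dict.empty)
  let vocab := PySem.Set.ofList (documents.flatMap (fun p => PySem.Str.split₀ p.2))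
  (classifiers, num_docs.items, num_words.items,
   bows.items.map (fun p => (p.1, p.2.items)), vocab)

-- ===== PRECONDITION & SPEC =====
def Spec_get_naive_elements (documents : List (String × String)) (out : List String × (List (String × Int)) × (List (String × Int)) × (List (String × List (String × Int))) × List String) : Prop := out = get_naive_elements_alt documents
set_option maxHeartbeats 1000000 in
instance (documents : List (String × String)) (out : List String × (List (String × Int)) × (List (String × Int)) × (List (String × List (String × Int))) × List String) : Decidable (Spec_get_naive_elements documents out) := by
  unfold Spec_get_naive_elements
  letI h1 : DecidableEq (List String) := inferInstance
  letI h2 : DecidableEq (List (String × Int)) := inferInstance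
  letI h3 : DecidableEq (List (String × List (String × Int))) := inferInstance
  exact instDecidableEqProd _ _

-- ===== CLAIM (what is proved, stated in full; the proofs are below) =====
def Claim_equal_get_naive_elements : Prop := ∀ (documents : List (String × String)), Dom_get_naive_elements documents → Spec_get_naive_elements documents (get_naive_elements documents)

-- ===== LEMMAS AND PROOFS =====

-- words of all documents with a given classifier, in document order
def gneW (c : String) (l : List (String × String)) : List String :=
  (l.filter (fun p => p.1 == c)).flatMap (fun p => PySem.Str.split₀ p.2)

-- first-appearance list of classifiers
def gneK (l : List (String × String)) : List String :=
  PySem.Set.ofList (l.map Prod.fst)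

def gneA (l : List (String × String)) :
    List String × PySem.Dict String Int × PySem.Dict String Int ×
    PySem.Dict String (PySem.Dict String Int) × PySem.Set String :=
  l.foldl gneStep ([], PySem.Dict.empty, PySem.Dict.empty, PySem.Dict.empty, PySem.Set.empty)

def gneB1 (l : List (String × String)) :
    List String × PySem.Dict String (List String) × PySem.Dict String Int :=
  l.foldl gneAltGroup ([], PySem.Dict.empty, PySem.Dict.empty)

lemma gneW_append_ne (c : String) (l : List (String × String)) (d : String × String)
    (h : ¬ d.1 = c) : gneW c (l ++ [d]) = gneW c l := by
  simp [gneW, List.filter_append, h]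

lemma gneW_append_eq (c : String) (l : List (String × String)) (s : String) :
    gneW c (l ++ [(c, s)]) = gneW c l ++ PySem.Str.split₀ s := by
  simp [gneW, List.filter_append]

lemma gneW_of_not_mem (c : String) (l : List (String × String))
    (h : c ∉ l.map Prod.fst) : gneW c l = [] := by
  unfold gneW
  have hf : l.filter (fun p => p.1 == c) = [] := by
    rw [List.filter_eq_nil_iff]
    intro p hp hc
    exact h (List.mem_map.2 ⟨p, hp, by simpa using hc⟩)
  simp [hf]

lemma gneK_nodup (l : List (String × String)) : (gneK l).Nodup :=
  PySem.Set.nodup_ofList _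

lemma gneK_append (l : List (String × String)) (d : String × String) :
    gneK (l ++ [d]) = PySem.Set.add (gneK l) d.1 := by
  simp [gneK, PySem.Set.ofList_eq_foldl, List.foldl_append]

lemma gneK_mem (l : List (String × String)) (x : String) :
    x ∈ gneK l ↔ x ∈ l.map Prod.fst := by
  simp [gneK, PySem.Set.mem_ofList]

-- replacing a key's value by the value it already has is the identity
lemma dict_insert_getD_self {K V : Type} [BEq K] [LawfulBEq K]
    (d : PySem.Dict K V) (k : K) (d0 : V)
    (hnd : d.keys.Nodup) (h : d.contains k = true) :
    d.insert k (d.getD k d0) = d := by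
  apply PySem.Dict.ext
  rw [PySem.Dict.items_insert_of_contains _ _ h]
  have hcongr : ∀ p ∈ d.items, (if p.1 == k then (k, d.getD k d0) else p) = p := by
    intro p hp
    by_cases hk : p.1 = k
    · have hmem : (k, p.2) ∈ d.items := by rw [← hk]; exact hp
      have hval := PySem.Dict.getD_of_mem_items d hmem hnd d0
      simp [Prod.ext_iff, hk, hval]
    · simp [hk]
  rw [List.map_congr_left hcongr]
  simp

-- one word-step of A, written as an explicit tuple
lemma gneInner_eq (c : String) (nw : PySem.Dict String Int)
    (bows : PySem.Dict String (PySem.Dict String Int)) (v : PySem.Set String) (w : String) :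
    gneInner c (nw, bows, v) w =
      (nw.modify c 0 (· + 1),
       if (bows.getD c PySem.Dict.empty).contains w = false
       then bows.insert c ((bows.getD c PySem.Dict.empty).insert w 1)
       else bows.insert c ((bows.getD c PySem.Dict.empty).modify w 0 (· + 1)),
       v.add w) := rfl

-- the bows update of gneInner is a plain 'modify'
lemma gneBowStep (bows : PySem.Dict String (PySem.Dict String Int)) (c w : String) :
    (if (bows.getD c PySem.Dict.empty).contains w = false
     then bows.insert c ((bows.getD c PySem.Dict.empty).insert w 1)
     else bows.insert c ((bows.getD c PySem.Dict.empty).modify w 0 (· + 1)))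
      = bows.insert c ((bows.getD c PySem.Dict.empty).modify w 0 (· + 1)) := by
  by_cases h : (bows.getD c PySem.Dict.empty).contains w = false
  · rw [if_pos h]
    congr 1
    unfold PySem.Dict.modify
    rw [PySem.Dict.getD_of_not_contains _ 0 h]
    norm_num
  · rw [if_neg h]

-- specification of A's inner word loop
lemma gneInner_spec (c : String) (ws : List String)
    (nw : PySem.Dict String Int) (bows : PySem.Dict String (PySem.Dict String Int))
    (v : PySem.Set String)
    (hnwd : nw.keys.Nodup) (hbd : bows.keys.Nodup)
    (hnw : nw.contains c = true) (hb : bows.contains c = true) :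
    ws.foldl (gneInner c) (nw, bows, v) =
      (nw.insert c (nw.getD c 0 + (ws.length : Int)),
       bows.insert c (ws.foldl (fun b w => b.modify w 0 (· + 1)) (bows.getD c PySem.Dict.empty)),
       PySem.Set.update v ws) := by
  induction ws generalizing nw bows v with
  | nil =>
      simp only [List.foldl_nil, List.length_nil, Nat.cast_zero, add_zero, PySem.Set.update]
      rw [dict_insert_getD_self nw c 0 hnwd hnw,
          dict_insert_getD_self bows c PySem.Dict.empty hbd hb]
  | cons w ws ih =>
      simp only [List.foldl_cons]
      rw [gneInner_eq, gneBowStep]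
      rw [ih _ _ _
            (by rw [PySem.Dict.keys_modify]; exact PySem.Dict.nodup_keys_insert _ _ _ hnwd)
            (PySem.Dict.nodup_keys_insert _ _ _ hbd)
            (by rw [PySem.Dict.contains_modify]; simp)
            (by rw [PySem.Dict.contains_insert]; simp)]
      refine congrArg₂ Prod.mk ?_ (congrArg₂ Prod.mk ?_ ?_)
      · unfold PySem.Dict.modify
        rw [PySem.Dict.insert_insert_self, PySem.Dict.getD_insert_self]
        congr 1
        simp only [List.length_cons]
        push_cast
        ring
      · rw [PySem.Dict.insert_insert_self, PySem.Dict.getD_insert_self]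
      · simp [PySem.Set.update]

-- one outer step of A, with the branch pushed outside
lemma gneStep_eq (ks : List String) (nd nw : PySem.Dict String Int)
    (bows : PySem.Dict String (PySem.Dict String Int)) (v : PySem.Set String)
    (d : String × String) :
    gneStep (ks, nd, nw, bows, v) d =
      if ks.contains d.1 = false then
        ((ks ++ [d.1], nd.insert d.1 1,
          ((PySem.Str.split₀ d.2).foldl (gneInner d.1)
            (nw.insert d.1 0, bows.insert d.1 PySem.Dict.empty, v)).1,
          ((PySem.Str.split₀ d.2).foldl (gneInner d.1)
            (nw.insert d.1 0, bows.insert d.1 PySem.Dict.empty, v)).2.1,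
          ((PySem.Str.split₀ d.2).foldl (gneInner d.1)
            (nw.insert d.1 0, bows.insert d.1 PySem.Dict.empty, v)).2.2))
      else
        ((ks, nd.modify d.1 0 (· + 1),
          ((PySem.Str.split₀ d.2).foldl (gneInner d.1) (nw, bows, v)).1,
          ((PySem.Str.split₀ d.2).foldl (gneInner d.1) (nw, bows, v)).2.1,
          ((PySem.Str.split₀ d.2).foldl (gneInner d.1) (nw, bows, v)).2.2)) := by
  unfold gneStep
  by_cases h : ks.contains d.1 = false <;> simp only [h] <;> simp

-- the invariant of A's document loop
lemma gneA_spec (l : List (String × String)) :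
    (gneA l).1 = gneK l ∧
    (gneA l).2.1.keys = gneK l ∧
    (∀ x, (gneA l).2.1.getD x 0 = ((l.map Prod.fst).count x : Int)) ∧
    (gneA l).2.2.1.keys = gneK l ∧
    (∀ x, (gneA l).2.2.1.getD x 0 = ((gneW x l).length : Int)) ∧
    (gneA l).2.2.2.1.keys = gneK l ∧
    (∀ x, (gneA l).2.2.2.1.getD x PySem.Dict.empty = PySem.Dict.counter (gneW x l)) ∧
    (gneA l).2.2.2.2 = PySem.Set.ofList (l.flatMap (fun p => PySem.Str.split₀ p.2)) := by
  induction l using List.reverseRecOn with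
  | nil =>
      refine ⟨rfl, rfl, fun x => ?_, rfl, fun x => ?_, rfl, fun x => ?_, rfl⟩ <;>
        simp [gneA, gneK, gneW, PySem.Dict.getD_empty, PySem.Dict.counter_eq_foldl]
  | append_singleton l d ih =>
      obtain ⟨c0, s0⟩ := d
      obtain ⟨hK, hndk, hnd, hnwk, hnw, hbk, hb, hv⟩ := ih
      have hstep : gneA (l ++ [(c0, s0)]) =
          gneStep ((gneA l).1, (gneA l).2.1, (gneA l).2.2.1, (gneA l).2.2.2.1, (gneA l).2.2.2.2) (c0, s0) := by
        simp [gneA, List.foldl_append]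
      rw [gneStep_eq] at hstep
      by_cases hmem : c0 ∈ l.map Prod.fst
      · -- classifier already present
        have hmemK : c0 ∈ gneK l := (gneK_mem l c0).2 hmem
        have hccm : c0 ∈ (gneA l).1 := by rw [hK]; exact hmemK
        rw [if_neg (by simpa using hccm)] at hstep
        rw [gneInner_spec c0 _ _ _ _
              (hnwk ▸ gneK_nodup l) (hbk ▸ gneK_nodup l)
              ((PySem.Dict.contains_iff_mem_keys _ _).2 (hnwk ▸ hmemK))
              ((PySem.Dict.contains_iff_mem_keys _ _).2 (hbk ▸ hmemK))] at hstep
        have hKsame : gneK (l ++ [(c0, s0)]) = gneK l := by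
          rw [gneK_append]
          exact PySem.Set.add_of_mem hmemK
        rw [hstep]
        refine ⟨?_, ?_, fun x => ?_, ?_, fun x => ?_, ?_, fun x => ?_, ?_⟩
        · rw [hK, hKsame]
        · rw [PySem.Dict.keys_modify,
              PySem.Dict.keys_insert_of_contains _ _ ((PySem.Dict.contains_iff_mem_keys _ _).2 (hndk ▸ hmemK)),
              hndk, hKsame]
        · by_cases hx : x = c0
          · subst hx
            simp [PySem.Dict.getD_modify, hnd x, List.count_append, List.count_singleton]
          · have hx' : ¬ c0 = x := fun h => hx h.symm
            simp [PySem.Dict.getD_modify, hx, hnd x, List.count_append, List.count_singleton, hx']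
        · rw [PySem.Dict.keys_insert_of_contains _ _ ((PySem.Dict.contains_iff_mem_keys _ _).2 (hnwk ▸ hmemK)),
              hnwk, hKsame]
        · by_cases hx : x = c0
          · subst hx
            simp [PySem.Dict.getD_insert_self, hnw x, gneW_append_eq]
          · have hx' : ¬ (c0, s0).1 = x := fun h => hx h.symm
            simp [PySem.Dict.getD_insert, hx, hnw x, gneW_append_ne x l (c0, s0) hx']
        · rw [PySem.Dict.keys_insert_of_contains _ _ ((PySem.Dict.contains_iff_mem_keys _ _).2 (hbk ▸ hmemK)),
              hbk, hKsame]
        · by_cases hx : x = c0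
          · subst hx
            rw [PySem.Dict.getD_insert_self, hb x, gneW_append_eq,
                PySem.Dict.counter_eq_foldl, PySem.Dict.counter_eq_foldl, List.foldl_append]
          · have hx' : ¬ (c0, s0).1 = x := fun h => hx h.symm
            simp [PySem.Dict.getD_insert, hx, hb x, gneW_append_ne x l (c0, s0) hx']
        · rw [hv, PySem.Set.update, PySem.Set.ofList_eq_foldl, PySem.Set.ofList_eq_foldl,
              List.flatMap_append, List.foldl_append]
          simp
      · -- new classifier
        have hmemK : c0 ∉ gneK l := fun h => hmem ((gneK_mem l c0).1 h)
        have hc : (gneA l).1.contains c0 = false := by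
          rw [hK]
          exact Bool.eq_false_iff.2 (fun h => hmemK (List.contains_iff_mem.1 h))
        rw [if_pos hc] at hstep
        rw [gneInner_spec c0 _ _ _ _
              (PySem.Dict.nodup_keys_insert _ _ _ (hnwk ▸ gneK_nodup l))
              (PySem.Dict.nodup_keys_insert _ _ _ (hbk ▸ gneK_nodup l))
              (PySem.Dict.contains_insert_self _ _ _)
              (PySem.Dict.contains_insert_self _ _ _)] at hstep
      -- the three dicts do not contain the new classifier yet
        have hndc : (gneA l).2.1.contains c0 = false :=
          Bool.eq_false_iff.2 (fun h => hmemK (hndk ▸ (PySem.Dict.contains_iff_mem_keys _ _).1 h))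
        have hnwc : (gneA l).2.2.1.contains c0 = false :=
          Bool.eq_false_iff.2 (fun h => hmemK (hnwk ▸ (PySem.Dict.contains_iff_mem_keys _ _).1 h))
        have hbc : (gneA l).2.2.2.1.contains c0 = false :=
          Bool.eq_false_iff.2 (fun h => hmemK (hbk ▸ (PySem.Dict.contains_iff_mem_keys _ _).1 h))
        have hKnew : gneK (l ++ [(c0, s0)]) = gneK l ++ [c0] := by
          rw [gneK_append]
          exact PySem.Set.add_of_not_mem hmemK
        rw [hstep]
        refine ⟨?_, ?_, fun x => ?_, ?_, fun x => ?_, ?_, fun x => ?_, ?_⟩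
        · rw [hK, hKnew]
        · rw [PySem.Dict.keys_insert_of_not_contains _ _ hndc, hndk, hKnew]
        · by_cases hx : x = c0
          · subst hx
            have h0 : (l.map Prod.fst).count x = 0 := List.count_eq_zero.2 hmem
            simp [PySem.Dict.getD_insert, List.count_append, List.count_singleton, h0]
          · have hx' : ¬ c0 = x := fun h => hx h.symm
            simp [PySem.Dict.getD_insert, hx, hnd x, List.count_append, List.count_singleton, hx']
        · rw [PySem.Dict.keys_insert_of_contains _ _ (PySem.Dict.contains_insert_self _ _ _),
              PySem.Dict.keys_insert_of_not_contains _ _ hnwc, hnwk, hKnew]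
        · by_cases hx : x = c0
          · subst hx
            simp [PySem.Dict.getD_insert_self, gneW_append_eq, gneW_of_not_mem x l hmem]
          · have hx' : ¬ (c0, s0).1 = x := fun h => hx h.symm
            simp [PySem.Dict.getD_insert, hx, hnw x, gneW_append_ne x l (c0, s0) hx']
        · rw [PySem.Dict.keys_insert_of_contains _ _ (PySem.Dict.contains_insert_self _ _ _),
              PySem.Dict.keys_insert_of_not_contains _ _ hbc, hbk, hKnew]
        · by_cases hx : x = c0
          · subst hx
            rw [PySem.Dict.getD_insert_self, PySem.Dict.getD_insert_self, gneW_append_eq,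
                gneW_of_not_mem x l hmem, PySem.Dict.counter_eq_foldl]
            simp
          · have hx' : ¬ (c0, s0).1 = x := fun h => hx h.symm
            simp [PySem.Dict.getD_insert, hx, hb x, gneW_append_ne x l (c0, s0) hx']
        · rw [hv, PySem.Set.update, PySem.Set.ofList_eq_foldl, PySem.Set.ofList_eq_foldl,
              List.flatMap_append, List.foldl_append]
          simp

-- one step of B's grouping loop, with the branch pushed outside
lemma gneAltGroup_eq (ks : List String) (groups : PySem.Dict String (List String))
    (nd : PySem.Dict String Int) (d : String × String) :
    gneAltGroup (ks, groups, nd) d =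
      if groups.contains d.1 = false then
        (ks ++ [d.1], (groups.insert d.1 []).modify d.1 [] (· ++ [d.2]),
         (nd.insert d.1 0).modify d.1 0 (· + 1))
      else
        (ks, groups.modify d.1 [] (· ++ [d.2]), nd.modify d.1 0 (· + 1)) := by
  unfold gneAltGroup
  by_cases h : groups.contains d.1 = false <;> simp only [h] <;> simp

-- the invariant of B's grouping loop
lemma gneB1_spec (l : List (String × String)) :
    (gneB1 l).1 = gneK l ∧
    (gneB1 l).2.1.keys = gneK l ∧
    (∀ x, (gneB1 l).2.1.getD x [] = (l.filter (fun p => p.1 == x)).map Prod.snd) ∧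
    (gneB1 l).2.2.keys = gneK l ∧
    (∀ x, (gneB1 l).2.2.getD x 0 = ((l.map Prod.fst).count x : Int)) := by
  induction l using List.reverseRecOn with
  | nil =>
      refine ⟨rfl, rfl, fun x => ?_, rfl, fun x => ?_⟩ <;>
        simp [gneB1, gneK, PySem.Dict.getD_empty]
  | append_singleton l d ih =>
      obtain ⟨c0, s0⟩ := d
      obtain ⟨hK, hgk, hg, hndk, hnd⟩ := ih
      have hstep : gneB1 (l ++ [(c0, s0)]) =
          gneAltGroup ((gneB1 l).1, (gneB1 l).2.1, (gneB1 l).2.2) (c0, s0) := by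
        simp [gneB1, List.foldl_append]
      rw [gneAltGroup_eq] at hstep
      by_cases hmem : c0 ∈ l.map Prod.fst
      · have hmemK : c0 ∈ gneK l := (gneK_mem l c0).2 hmem
        have hcc : (gneB1 l).2.1.contains c0 = true :=
          (PySem.Dict.contains_iff_mem_keys _ _).2 (hgk ▸ hmemK)
        have hKsame : gneK (l ++ [(c0, s0)]) = gneK l := by
          rw [gneK_append]
          exact PySem.Set.add_of_mem hmemK
        rw [if_neg (by simp [hcc])] at hstep
        rw [hstep]
        refine ⟨?_, ?_, fun x => ?_, ?_, fun x => ?_⟩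
        · rw [hK, hKsame]
        · rw [PySem.Dict.keys_modify, PySem.Dict.keys_insert_of_contains _ _ hcc, hgk, hKsame]
        · by_cases hx : x = c0
          · subst hx
            simp [PySem.Dict.getD_modify, hg x, List.filter_append]
          · have hx' : ¬ c0 = x := fun h => hx h.symm
            simp [PySem.Dict.getD_modify, hx, hg x, List.filter_append, hx']
        · rw [PySem.Dict.keys_modify,
              PySem.Dict.keys_insert_of_contains _ _ ((PySem.Dict.contains_iff_mem_keys _ _).2 (hndk ▸ hmemK)),
              hndk, hKsame]
        · by_cases hx : x = c0
          · subst hx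
            simp [PySem.Dict.getD_modify, hnd x, List.count_append, List.count_singleton]
          · have hx' : ¬ c0 = x := fun h => hx h.symm
            simp [PySem.Dict.getD_modify, hx, hnd x, List.count_append, List.count_singleton, hx']
      · have hmemK : c0 ∉ gneK l := fun h => hmem ((gneK_mem l c0).1 h)
        have hc : (gneB1 l).2.1.contains c0 = false :=
          Bool.eq_false_iff.2 (fun h => hmemK (hgk ▸ (PySem.Dict.contains_iff_mem_keys _ _).1 h))
        have hndc : (gneB1 l).2.2.contains c0 = false :=
          Bool.eq_false_iff.2 (fun h => hmemK (hndk ▸ (PySem.Dict.contains_iff_mem_keys _ _).1 h))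
        have hKnew : gneK (l ++ [(c0, s0)]) = gneK l ++ [c0] := by
          rw [gneK_append]
          exact PySem.Set.add_of_not_mem hmemK
        rw [if_pos hc] at hstep
        rw [hstep]
        refine ⟨?_, ?_, fun x => ?_, ?_, fun x => ?_⟩
        · rw [hK, hKnew]
        · rw [PySem.Dict.keys_modify,
              PySem.Dict.keys_insert_of_contains _ _ (PySem.Dict.contains_insert_self _ _ _),
              PySem.Dict.keys_insert_of_not_contains _ _ hc, hgk, hKnew]
        · by_cases hx : x = c0
          · subst hx
            have hfe : l.filter (fun p => p.1 == x) = [] := by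
              rw [List.filter_eq_nil_iff]
              intro p hp hpc
              exact hmem (List.mem_map.2 ⟨p, hp, by simpa using hpc⟩)
            simp [PySem.Dict.getD_modify, PySem.Dict.getD_insert, List.filter_append, hfe]
          · have hx' : ¬ c0 = x := fun h => hx h.symm
            simp [PySem.Dict.getD_modify, PySem.Dict.getD_insert, hx, hg x, List.filter_append, hx']
        · rw [PySem.Dict.keys_modify,
              PySem.Dict.keys_insert_of_contains _ _ (PySem.Dict.contains_insert_self _ _ _),
              PySem.Dict.keys_insert_of_not_contains _ _ hndc, hndk, hKnew]
        · by_cases hx : x = c0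
          · subst hx
            have h0 : (l.map Prod.fst).count x = 0 := List.count_eq_zero.2 hmem
            simp [PySem.Dict.getD_modify, PySem.Dict.getD_insert, List.count_append,
                  List.count_singleton, h0]
          · have hx' : ¬ c0 = x := fun h => hx h.symm
            simp [PySem.Dict.getD_modify, PySem.Dict.getD_insert, hx, hnd x, List.count_append,
                  List.count_singleton, hx']

-- B's phase-2 fold over a pair splits into two independent folds
lemma gne_phase2_split (groups : PySem.Dict String (List String)) (ks : List String)
    (d1 : PySem.Dict String Int) (d2 : PySem.Dict String (PySem.Dict String Int)) :
    ks.foldl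
      (fun (st : PySem.Dict String Int × PySem.Dict String (PySem.Dict String Int)) c =>
        let words := (groups.getD c []).flatMap (fun content => PySem.Str.split₀ content)
        (st.1.insert c (words.length : Int), st.2.insert c (gneAltBow words))) (d1, d2)
      = (ks.foldl (fun d c =>
            d.insert c ((((groups.getD c []).flatMap (fun content => PySem.Str.split₀ content)).length : Int))) d1,
         ks.foldl (fun d c =>
            d.insert c (gneAltBow ((groups.getD c []).flatMap (fun content => PySem.Str.split₀ content)))) d2) := by
  induction ks generalizing d1 d2 with
  | nil => rfl
  | cons c cs ih =>
      simp only [List.foldl_cons]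
      exact ih _ _

lemma gne_items_of_fresh_fold {V : Type} (ks : List String) (f : String → V)
    (hnd : ks.Nodup) :
    (ks.foldl (fun (d : PySem.Dict String V) c => d.insert c (f c)) PySem.Dict.empty).items
      = ks.map (fun c => (c, f c)) := by
  have h := PySem.Dict.items_foldl_insert_fresh ks (fun c => c) f PySem.Dict.empty
    (fun a _ => PySem.Dict.contains_empty a) (by simpa using hnd)
  simpa [PySem.Dict.empty] using h

-- ===== VERDICT (by name: the statement is the Claim_ definition above) =====
set_option maxHeartbeats 1000000 in
theorem get_naive_elements_spec : Claim_equal_get_naive_elements := by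
  unfold Claim_equal_get_naive_elements
  intro l _
  unfold Spec_get_naive_elements
  obtain ⟨hK, hndk, hnd, hnwk, hnw, hbk, hb, hv⟩ := gneA_spec l
  obtain ⟨hK', hgk, hg, hndk', hnd'⟩ := gneB1_spec l
  have hA : get_naive_elements l =
      ((gneA l).1, (gneA l).2.1.items, (gneA l).2.2.1.items,
       (gneA l).2.2.2.1.items.map (fun p => (p.1, p.2.items)), (gneA l).2.2.2.2) := rfl
  have hwordsB : ∀ c, ((gneB1 l).2.1.getD c []).flatMap (fun content => PySem.Str.split₀ content)
      = gneW c l := by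
    intro c
    rw [hg c, List.flatMap_map]
    rfl
  have hB : get_naive_elements_alt l =
      ((gneB1 l).1,
       (gneB1 l).2.2.items,
       ((gneB1 l).1.foldl (fun d c =>
          d.insert c (((((gneB1 l).2.1.getD c []).flatMap (fun content => PySem.Str.split₀ content)).length : Int)))
          PySem.Dict.empty).items,
       ((gneB1 l).1.foldl (fun d c =>
          d.insert c (gneAltBow (((gneB1 l).2.1.getD c []).flatMap (fun content => PySem.Str.split₀ content))))
          PySem.Dict.empty).items.map (fun p => (p.1, p.2.items)),
       PySem.Set.ofList (l.flatMap (fun p => PySem.Str.split₀ p.2))) := by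
    rw [show get_naive_elements_alt l =
        ((gneB1 l).1,
         (gneB1 l).2.2.items,
         ((gneB1 l).1.foldl
            (fun (st : PySem.Dict String Int × PySem.Dict String (PySem.Dict String Int)) c =>
              let words := ((gneB1 l).2.1.getD c []).flatMap (fun content => PySem.Str.split₀ content)
              (st.1.insert c (words.length : Int), st.2.insert c (gneAltBow words)))
            (PySem.Dict.empty, PySem.Dict.empty)).1.items,
         ((gneB1 l).1.foldl
            (fun (st : PySem.Dict String Int × PySem.Dict String (PySem.Dict String Int)) c =>
              let words := ((gneB1 l).2.1.getD c []).flatMap (fun content => PySem.Str.split₀ content)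
              (st.1.insert c (words.length : Int), st.2.insert c (gneAltBow words)))
            (PySem.Dict.empty, PySem.Dict.empty)).2.items.map (fun p => (p.1, p.2.items)),
         PySem.Set.ofList (l.flatMap (fun p => PySem.Str.split₀ p.2))) from rfl,
       gne_phase2_split]
  rw [hA, hB]
  have hnodA : (gneA l).2.1.keys.Nodup := hndk ▸ gneK_nodup l
  have hnodA2 : (gneA l).2.2.1.keys.Nodup := hnwk ▸ gneK_nodup l
  have hnodA3 : (gneA l).2.2.2.1.keys.Nodup := hbk ▸ gneK_nodup l
  have hnodB : (gneB1 l).2.2.keys.Nodup := hndk' ▸ gneK_nodup l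
  refine congrArg₂ Prod.mk ?_ (congrArg₂ Prod.mk ?_ (congrArg₂ Prod.mk ?_ (congrArg₂ Prod.mk ?_ ?_)))
  · rw [hK, hK']
  · rw [PySem.Dict.items_eq_map_keys _ hnodA 0, PySem.Dict.items_eq_map_keys _ hnodB 0,
        hndk, hndk']
    exact List.map_congr_left (fun x _ => by rw [hnd x, hnd' x])
  · rw [PySem.Dict.items_eq_map_keys _ hnodA2 0,
        gne_items_of_fresh_fold _ _ (hK' ▸ gneK_nodup l), hnwk, hK']
    refine List.map_congr_left (fun x _ => ?_)
    rw [hnw x, hwordsB x]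
  · rw [PySem.Dict.items_eq_map_keys _ hnodA3 PySem.Dict.empty,
        gne_items_of_fresh_fold _ _ (hK' ▸ gneK_nodup l), hbk, hK',
        List.map_map, List.map_map]
    refine List.map_congr_left (fun x _ => ?_)
    simp only [Function.comp]
    rw [hb x, hwordsB x, show gneAltBow (gneW x l) = PySem.Dict.counter (gneW x l) from
          PySem.Dict.foldl_insert_getD_add_one_eq_counter (gneW x l)]
  · exact hv
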